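-- pv_equiv track=rewrite | github.com/scottpitcher/news-checker-project | backend/checkers.py | check_source_concentration
-- ===== SOURCE A (Python) =====
-- from typing import Iterable, List, Optional
--
-- def check_source_concentration(articles: Iterable[dict]) -> List[str]:
--     article_list = list(articles or [])
--     if len(article_list) < 2:
--         return []
--
--     families = {str(a.get("family") or a.get("outlet") or "").strip().lower() for a in article_list}
--     families.discard("")
--     if len(families) == 1:
--         return [
--             "Matched coverage appears concentrated in one outlet family, so viewpoint diversity may be limited."
--         ]
--     return []
-- ===== SOURCE B (Python) =====
-- from typing import Iterable, List
--
--
-- def check_source_concentration(articles: Iterable[dict]) -> List[str]: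
--     article_list = list(articles or [])
--     if len(article_list) < 2:
--         return []
--
--     fams = sorted(
--         f
--         for f in (
--             str(a.get("family") or a.get("outlet") or "").strip().lower()
--             for a in article_list
--         )
--         if f
--     )
--     # endpoints of a sorted list coincide iff every element is the same family
--     if fams and fams[0] == fams[-1]:
--         return [
--             "Matched coverage appears concentrated in one outlet family, so viewpoint diversity may be limited."
--         ]
--     return []
-- ===== Notes on version B (the rewrite author's own statement) =====
-- stated objective: alternative
-- what changed: Replaces the set build + discard + size==1 check with sorting the non-empty normalized families and testing that the sorted list's first and last elements coincide.
import Mathlib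
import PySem

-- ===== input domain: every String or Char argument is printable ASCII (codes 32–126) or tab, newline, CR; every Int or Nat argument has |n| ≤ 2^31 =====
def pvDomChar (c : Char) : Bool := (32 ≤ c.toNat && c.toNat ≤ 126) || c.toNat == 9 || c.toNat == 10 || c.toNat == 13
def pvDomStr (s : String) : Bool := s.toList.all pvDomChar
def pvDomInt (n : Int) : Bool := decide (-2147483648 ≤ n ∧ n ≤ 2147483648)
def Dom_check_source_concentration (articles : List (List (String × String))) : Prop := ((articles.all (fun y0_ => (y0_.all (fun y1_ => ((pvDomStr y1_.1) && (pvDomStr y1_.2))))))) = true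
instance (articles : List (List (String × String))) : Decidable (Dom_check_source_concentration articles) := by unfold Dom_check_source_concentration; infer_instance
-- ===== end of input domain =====

-- B sorts the non-empty normalized families and warns iff the sorted list's endpoints coincide, instead of A's set build + discard + size check; objective: alternative.

-- shared helper: str(a.get("family") or a.get("outlet") or "").strip().lower()
def cscOrStr (o : Option String) (fallback : String) : String :=
  match o with
  | some s => if s = "" then fallback else s
  | none => fallback

def cscFam (a : List (String × String)) : String :=
  PySem.Str.lower (PySem.Str.strip
    (cscOrStr (PySem.Dict.get? (PySem.Dict.mk a) "family")
      (cscOrStr (PySem.Dict.get? (PySem.Dict.mk a) "outlet") "")))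

def cscMsg : String :=
  "Matched coverage appears concentrated in one outlet family, so viewpoint diversity may be limited."

-- ===== PORT A =====
def check_source_concentration (articles : List (List (String × String))) : List String :=
  let article_list := articles
  if article_list.length < 2 then []
  else
    let families : PySem.Set String := PySem.Set.ofList (article_list.map cscFam)
    let families := PySem.Set.discard families ""
    if PySem.Set.len families = 1 then [cscMsg] else []

-- ===== PORT B =====
def check_source_concentration_alt (articles : List (List (String × String))) : List String :=
  let article_list := articles
  if article_list.length < 2 then []
  else
    let fams := PySem.List.sorted ((article_list.map cscFam).filter (fun f => f ≠ "")) (fun x => x) false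
    match h : fams with
    | [] => []
    | f :: rest => if (f :: rest).getLast (by simp) = f then [cscMsg] else []

-- ===== PRECONDITION & SPEC =====
def Spec_check_source_concentration (articles : List (List (String × String))) (out : List String) : Prop := out = check_source_concentration_alt articles
instance (articles : List (List (String × String))) (out : List String) : Decidable (Spec_check_source_concentration articles out) := by unfold Spec_check_source_concentration; infer_instance

-- ===== CLAIM (what is proved, stated in full; the proofs are below) =====
def Claim_equal_check_source_concentration : Prop := ∀ (articles : List (List (String × String))), Dom_check_source_concentration articles → Spec_check_source_concentration articles (check_source_concentration articles)

-- ===== LEMMAS AND PROOFS =====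

theorem nodup_len_one {α : Type} (S : List α) (h : S.Nodup) :
    S.length = 1 ↔ ∃ a, a ∈ S ∧ ∀ x ∈ S, x = a := by
  cases S with
  | nil => simp
  | cons a t =>
    cases t with
    | nil => simp
    | cons b t' =>
      simp only [List.length_cons]
      constructor
      · intro h1; omega
      · rintro ⟨w, -, hall⟩
        exfalso
        have ha := hall a (by simp)
        have hb := hall b (by simp)
        rw [List.nodup_cons] at h
        exact h.1 (by simp [ha.trans hb.symm])

-- a sorted list whose endpoints coincide is constant; conversely a constant list has equal endpoints
theorem sorted_endpoints (L : List String) :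
    (∃ a, a ∈ L ∧ ∀ x ∈ L, x = a) ↔
      (match PySem.List.sorted L (fun x => x) false with
       | [] => False
       | f :: rest => (f :: rest).getLast (by simp) = f) := by
  have hperm := PySem.List.sorted_perm L (fun x : String => x) false
  constructor
  · rintro ⟨a, ha, hall⟩
    have hS : ∀ x ∈ PySem.List.sorted L (fun x : String => x) false, x = a :=
      fun x hx => hall x (hperm.mem_iff.mp hx)
    rcases h : PySem.List.sorted L (fun x : String => x) false with _ | ⟨f, rest⟩
    · exact absurd (hperm.mem_iff.mpr ha) (by simp [h])
    · simp only []
      have hlast : (f :: rest).getLast (by simp) = a :=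
        hS _ (by rw [h]; exact List.getLast_mem _)
      have hf : f = a := hS f (by rw [h]; simp)
      rw [hlast, hf]
  · intro hmatch
    rcases h : PySem.List.sorted L (fun x : String => x) false with _ | ⟨f, rest⟩
    · rw [h] at hmatch; exact absurd hmatch (by simp)
    · rw [h] at hmatch
      simp only [] at hmatch
      refine ⟨f, hperm.mem_iff.mp (by rw [h]; simp), ?_⟩
      intro x hx
      have hxS : x ∈ (f :: rest) := by rw [← h]; exact hperm.mem_iff.mpr hx
      obtain ⟨i, hi, hix⟩ := List.mem_iff_getElem.mp hxS
      have h0 : (f :: rest)[0] = f := rfl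
      have hn : (f :: rest)[(f :: rest).length - 1] = (f :: rest).getLast (by simp) :=
        (List.getLast_eq_getElem _).symm
      have hlo : (f :: rest)[0] ≤ (f :: rest)[i] := by
        have := PySem.List.sorted_id_getElem_mono (xs := L) (p := 0) (q := i)
          (by omega) (by rw [h]; exact hi)
        simpa [h] using this
      have hhi : (f :: rest)[i] ≤ (f :: rest)[(f :: rest).length - 1] := by
        have := PySem.List.sorted_id_getElem_mono (xs := L) (p := i) (q := (f :: rest).length - 1)
          (by omega) (by rw [h]; simp)
        simpa [h] using this
      rw [h0] at hlo
      rw [hn, hmatch] at hhi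
      rw [← hix]
      exact le_antisymm hhi hlo

-- ===== VERDICT (by name: the statement is the Claim_ definition above) =====
theorem check_source_concentration_spec : Claim_equal_check_source_concentration := by
  intro articles _
  unfold Spec_check_source_concentration
  by_cases hlen : articles.length < 2
  · simp [check_source_concentration, check_source_concentration_alt, hlen]
  · set L := (articles.map cscFam).filter (fun f => f ≠ "") with hL
    have hne_mem : ∀ x, x ∈ L ↔
        x ∈ PySem.Set.discard (PySem.Set.ofList (articles.map cscFam)) "" := by
      intro x
      simp [hL, List.mem_filter, PySem.Set.mem_discard, PySem.Set.mem_ofList]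
    have hnd : (PySem.Set.discard (PySem.Set.ofList (articles.map cscFam)) "").Nodup :=
      PySem.Set.nodup_discard _ _ (PySem.Set.nodup_ofList _)
    have hchar : ((PySem.Set.discard (PySem.Set.ofList (articles.map cscFam)) "").length = 1)
        ↔ (∃ a, a ∈ L ∧ ∀ x ∈ L, x = a) := by
      rw [nodup_len_one _ hnd]
      constructor
      · rintro ⟨a, ha, hall⟩
        exact ⟨a, (hne_mem a).mpr ha, fun x hx => hall x ((hne_mem x).mp hx)⟩
      · rintro ⟨a, ha, hall⟩
        exact ⟨a, (hne_mem a).mp ha, fun x hx => hall x ((hne_mem x).mpr hx)⟩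
    have hend := sorted_endpoints L
    simp only [check_source_concentration, check_source_concentration_alt, hlen, if_false]
    rcases h : PySem.List.sorted L (fun x : String => x) false with _ | ⟨f, rest⟩
    · have h0 : ¬ ((PySem.Set.discard (PySem.Set.ofList (articles.map cscFam)) "").length = 1) := by
        rw [hchar, hend, h]; exact id
      simp [PySem.Set.len, h0]
    · by_cases hq : (f :: rest).getLast (by simp) = f
      · have h1 : (PySem.Set.discard (PySem.Set.ofList (articles.map cscFam)) "").length = 1 := by
          rw [hchar, hend, h]; exact hq
        simp [PySem.Set.len, h1, hq]
      · have h1 : ¬ ((PySem.Set.discard (PySem.Set.ofList (articles.map cscFam)) "").length = 1) := by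
          rw [hchar, hend, h]; exact hq
        simp [PySem.Set.len, h1, hq]
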